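-- pv_equiv track=rewrite | github.com/Huijunkai/My-Group | Data collection and preprocessing/NO4-ScrapyProject/discussion_collect/discussion_collect/discussion_collect/spiders/2discussion_clean_spiders.py | clean_numeric_string
-- ===== SOURCE A (Python) =====
-- def clean_numeric_string(value):
--     """清洗数值字符串：仅保留数字和小数点，去除其他字符（如逗号、单位、空格）"""
--     if not isinstance(value, str):
--         value = str(value)
--     # 保留0-9和.，去除所有其他字符
--     cleaned = ''.join([c for c in value.strip() if c.isdigit() or c == '.'])
--     # 处理多个小数点的情况（仅保留第一个）
--     if cleaned.count('.') > 1: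
--         parts = cleaned.split('.')
--         cleaned = parts[0] + '.' + ''.join(parts[1:])
--     return cleaned if cleaned else None
-- ===== SOURCE B (Python) =====
-- def clean_numeric_string(value):
--     """Single stateful pass: keep digits, keep only the first decimal point."""
--     if not isinstance(value, str):
--         value = str(value)
--     out = []
--     seen_dot = False
--     for c in value.strip():
--         if c.isdigit():
--             out.append(c)
--         elif c == '.' and not seen_dot:
--             out.append(c)
--             seen_dot = True
--     return ''.join(out) if out else None
-- ===== Notes on version B (the rewrite author's own statement) =====
-- stated objective: simpler
-- what changed: Replaced A's two-phase pipeline (filter digits-and-dots into a string, then count dots and repair duplicates via split/join) with a single pass over the stripped string carrying a seen_dot flag that keeps digits and only the first decimal point.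
import Mathlib
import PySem

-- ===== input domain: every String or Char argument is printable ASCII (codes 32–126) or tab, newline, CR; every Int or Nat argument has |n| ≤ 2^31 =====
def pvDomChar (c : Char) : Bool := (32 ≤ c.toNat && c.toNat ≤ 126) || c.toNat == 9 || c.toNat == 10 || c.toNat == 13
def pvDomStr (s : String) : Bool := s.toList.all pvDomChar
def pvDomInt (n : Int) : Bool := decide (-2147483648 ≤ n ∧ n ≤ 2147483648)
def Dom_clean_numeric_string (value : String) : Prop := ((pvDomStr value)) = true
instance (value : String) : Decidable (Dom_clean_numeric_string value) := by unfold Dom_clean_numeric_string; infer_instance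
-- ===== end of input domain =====

-- B replaces A's filter-then-repair-duplicate-dots two-phase pipeline by one stateful pass
-- with a seen_dot flag (objective: simpler). The isinstance branch is vacuous for String input.

-- ===== PORT A =====
-- filter keeps digits and '.'; then if more than one '.', split on '.' and rejoin keeping the first.
def clean_numeric_string (value : String) : Option String :=
  let cleaned : List Char :=
    (PySem.Chars.strip value.toList).filter (fun c => PySem.Chars.isdigit c || c == '.')
  let cleaned : List Char :=
    if PySem.Chars.count cleaned ['.'] > 1 then
      let parts := PySem.Chars.splitOn cleaned ['.']
      -- parts[0]: split always returns a nonempty list, so headI is Python's parts[0]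
      parts.headI ++ ['.'] ++ PySem.Chars.join [] (PySem.List.slice parts (some 1))
    else cleaned
  if cleaned.isEmpty then none else some (String.ofList cleaned)

-- ===== PORT B =====
-- the loop body of B: append digits; append '.' only when the flag is still false
def pvStep (st : List Char × Bool) (c : Char) : List Char × Bool :=
  if PySem.Chars.isdigit c then (st.1 ++ [c], st.2)
  else if c == '.' && !st.2 then (st.1 ++ [c], true)
  else st

def clean_numeric_string_alt (value : String) : Option String :=
  let st : List Char × Bool := (PySem.Chars.strip value.toList).foldl pvStep ([], false)
  if st.1.isEmpty then none else some (String.ofList st.1)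

-- ===== PRECONDITION & SPEC =====
def Spec_clean_numeric_string (value : String) (out : Option String) : Prop := out = clean_numeric_string_alt value
instance (value : String) (out : Option String) : Decidable (Spec_clean_numeric_string value out) := by unfold Spec_clean_numeric_string; infer_instance

-- ===== CLAIM (what is proved, stated in full; the proofs are below) =====
def Claim_equal_clean_numeric_string : Prop := ∀ (value : String), Dom_clean_numeric_string value → Spec_clean_numeric_string value (clean_numeric_string value)

-- ===== LEMMAS AND PROOFS =====

-- B's one-pass result as a structural recursion (flag false)
def pvB1 : List Char → List Char
  | [] => []
  | c :: t =>
    if PySem.Chars.isdigit c then c :: pvB1 t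
    else if c == '.' then c :: t.filter PySem.Chars.isdigit
    else pvB1 t

-- "keep the first dot" repair on an already-filtered list
def pvFix : List Char → List Char
  | [] => []
  | c :: t => if c == '.' then c :: t.filter (fun d => !(d == '.')) else c :: pvFix t

def pvKeep (c : Char) : Bool := PySem.Chars.isdigit c || c == '.'

-- reference splitter: pvSplit pre l = pre-prefixed parts of l split at '.'
def pvSplit (pre : List Char) : List Char → List (List Char)
  | [] => [pre]
  | c :: t => if c == '.' then pre :: pvSplit [] t else pvSplit (pre ++ [c]) t

lemma pv_isdigit_ne_dot (c : Char) (h : PySem.Chars.isdigit c = true) : (c == '.') = false := by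
  simp only [PySem.Chars.isdigit, Bool.and_eq_true, decide_eq_true_eq] at h
  simp only [beq_eq_false_iff_ne, ne_eq]
  rintro rfl
  exact absurd h.1 (by decide)

-- equation lemmas
lemma pvSplit_dot (pre t) : pvSplit pre ('.' :: t) = pre :: pvSplit [] t := by simp [pvSplit]
lemma pvSplit_ne (pre t) {c : Char} (hc : c ≠ '.') :
    pvSplit pre (c :: t) = pvSplit (pre ++ [c]) t := by simp [pvSplit, hc]
lemma pvFix_dot (t) : pvFix ('.' :: t) = '.' :: t.filter (fun d => !(d == '.')) := by simp [pvFix]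
lemma pvFix_ne (t) {c : Char} (hc : c ≠ '.') : pvFix (c :: t) = c :: pvFix t := by simp [pvFix, hc]
lemma pvB1_digit (t) {c : Char} (hd : PySem.Chars.isdigit c = true) :
    pvB1 (c :: t) = c :: pvB1 t := by simp [pvB1, hd]
lemma pvB1_dot (t) (hd : PySem.Chars.isdigit '.' = false) :
    pvB1 ('.' :: t) = '.' :: t.filter PySem.Chars.isdigit := by simp [pvB1, hd]
lemma pvB1_skip (t) {c : Char} (hd : PySem.Chars.isdigit c = false) (hc : c ≠ '.') :
    pvB1 (c :: t) = pvB1 t := by simp [pvB1, hd, hc]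
lemma pvStep_digit (st) {c : Char} (hd : PySem.Chars.isdigit c = true) :
    pvStep st c = (st.1 ++ [c], st.2) := by simp [pvStep, hd]
lemma pvStep_dot_false (a : List Char) (hd : PySem.Chars.isdigit '.' = false) :
    pvStep (a, false) '.' = (a ++ ['.'], true) := by simp [pvStep, hd]
lemma pvStep_skip_true (a : List Char) {c : Char} (hd : PySem.Chars.isdigit c = false) :
    pvStep (a, true) c = (a, true) := by simp [pvStep, hd]
lemma pvStep_skip (a : List Char) (b : Bool) {c : Char} (hd : PySem.Chars.isdigit c = false)
    (hc : c ≠ '.') : pvStep (a, b) c = (a, b) := by simp [pvStep, hd, hc]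

lemma pv_countgo (l : List Char) : ∀ (fuel acc : ℕ), l.length ≤ fuel →
    PySem.Chars.count.go ['.'] fuel l acc = acc + l.count '.' := by
  induction l with
  | nil => intro fuel acc _; cases fuel <;> simp [PySem.Chars.count.go]
  | cons c t ih =>
    intro fuel acc hf
    cases fuel with
    | zero => simp at hf
    | succ n =>
      simp only [List.length_cons, Nat.add_le_add_iff_right] at hf
      unfold PySem.Chars.count.go
      by_cases hc : c = '.'
      · subst hc
        have hpre : List.isPrefixOf ['.'] ('.' :: t) = true := by simp [List.isPrefixOf]
        simp only [hpre, List.length_singleton, List.drop_succ_cons, List.drop_zero]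
        rw [ih n (acc + 1) hf]
        simp
        omega
      · have hpre : List.isPrefixOf ['.'] (c :: t) = false := by
          simp [List.isPrefixOf]
          exact fun h => hc h.symm
        simp only [hpre, Bool.false_eq_true, if_false]
        rw [ih n acc hf]
        simp [hc]

lemma pv_count_eq (l : List Char) : PySem.Chars.count l ['.'] = l.count '.' := by
  unfold PySem.Chars.count
  simp only [List.isEmpty_cons, Bool.false_eq_true, if_false]
  rw [pv_countgo l l.length 0 le_rfl]
  omega

lemma pv_splitgo (l : List Char) : ∀ (fuel : ℕ) (cur : List Char) (acc : List (List Char)),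
    l.length < fuel →
    PySem.Chars.splitOn.go ['.'] fuel l cur acc = acc.reverse ++ pvSplit cur.reverse l := by
  induction l with
  | nil =>
    intro fuel cur acc hf
    cases fuel with
    | zero => omega
    | succ n => simp [PySem.Chars.splitOn.go, pvSplit]
  | cons c t ih =>
    intro fuel cur acc hf
    cases fuel with
    | zero => omega
    | succ n =>
      simp only [List.length_cons] at hf
      unfold PySem.Chars.splitOn.go
      by_cases hc : c = '.'
      · subst hc
        have hpre : List.isPrefixOf ['.'] ('.' :: t) = true := by simp [List.isPrefixOf]
        simp only [hpre, List.length_singleton, List.drop_succ_cons, List.drop_zero]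
        rw [ih n [] (cur.reverse :: acc) (by omega), pvSplit_dot]
        simp
      · have hpre : List.isPrefixOf ['.'] (c :: t) = false := by
          simp [List.isPrefixOf]
          exact fun h => hc h.symm
        simp only [hpre, Bool.false_eq_true, if_false]
        rw [ih n (c :: cur) acc (by omega), pvSplit_ne _ _ hc]
        simp

lemma pv_splitOn_eq (l : List Char) : PySem.Chars.splitOn l ['.'] = pvSplit [] l := by
  unfold PySem.Chars.splitOn
  have := pv_splitgo l (l.length + 1) [] [] (by omega)
  simpa using this

lemma pv_join_cons (a : List Char) (rest : List (List Char)) :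
    PySem.Chars.join [] (a :: rest) = a ++ PySem.Chars.join [] rest := by
  cases rest with
  | nil => simp [PySem.Chars.join_singleton, PySem.Chars.join_nil]
  | cons b r => rw [PySem.Chars.join_cons_cons]; simp

lemma pv_split_headI (l : List Char) : ∀ pre,
    (pvSplit pre l).headI = pre ++ l.takeWhile (fun c => !(c == '.')) := by
  induction l with
  | nil => intro pre; simp [pvSplit]
  | cons c t ih =>
    intro pre
    by_cases hc : c = '.'
    · subst hc; simp [pvSplit_dot]
    · rw [pvSplit_ne _ _ hc, ih (pre ++ [c])]
      simp [hc]

lemma pv_join_split (l : List Char) : ∀ pre,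
    PySem.Chars.join [] (pvSplit pre l) = pre ++ l.filter (fun c => !(c == '.')) := by
  induction l with
  | nil => intro pre; simp [pvSplit, PySem.Chars.join_singleton]
  | cons c t ih =>
    intro pre
    by_cases hc : c = '.'
    · subst hc
      rw [pvSplit_dot, pv_join_cons, ih []]
      simp
    · rw [pvSplit_ne _ _ hc, ih (pre ++ [c])]
      simp [hc]

lemma pv_split_drop1 (l : List Char) : ∀ pre,
    PySem.Chars.join [] ((pvSplit pre l).drop 1) =
      ((l.dropWhile (fun c => !(c == '.'))).drop 1).filter (fun c => !(c == '.')) := by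
  induction l with
  | nil => intro pre; simp [pvSplit, PySem.Chars.join_nil]
  | cons c t ih =>
    intro pre
    by_cases hc : c = '.'
    · subst hc
      rw [pvSplit_dot]
      simp only [List.drop_succ_cons, List.drop_zero]
      rw [pv_join_split t []]
      simp
    · rw [pvSplit_ne _ _ hc, ih (pre ++ [c])]
      simp [hc]

-- at most one dot: the repair-shaped fix is the identity
lemma pv_fix_of_count_le_one (f : List Char) (h : f.count '.' ≤ 1) : pvFix f = f := by
  induction f with
  | nil => rfl
  | cons c t ih =>
    by_cases hc : c = '.'
    · subst hc
      have ht : '.' ∉ t := by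
        intro hm
        have := List.count_pos_iff.mpr hm
        simp at h
        omega
      rw [pvFix_dot]
      refine congrArg _ (List.filter_eq_self.mpr (fun a ha => ?_))
      simp only [Bool.not_eq_eq_eq_not, Bool.not_true, beq_eq_false_iff_ne, ne_eq]
      rintro rfl; exact ht ha
    · have h' : t.count '.' ≤ 1 := by simp [hc] at h ⊢; omega
      rw [pvFix_ne _ hc, ih h']

-- the split-rejoin repair equals fix when a dot is present
lemma pv_repair_eq_fix (f : List Char) (h : '.' ∈ f) :
    (pvSplit [] f).headI ++ ['.'] ++ PySem.Chars.join [] ((pvSplit [] f).drop 1) = pvFix f := by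
  induction f with
  | nil => cases h
  | cons c t ih =>
    by_cases hc : c = '.'
    · subst hc
      rw [pvSplit_dot]
      simp only [List.headI, List.drop_succ_cons, List.drop_zero]
      rw [pv_join_split t [], pvFix_dot]
      simp
    · have ht : '.' ∈ t := by
        cases h with
        | head => exact absurd rfl hc
        | tail _ h => exact h
      rw [pvSplit_ne _ _ hc]
      simp only [List.nil_append]
      rw [pv_split_headI t [c], pv_split_drop1 t [c], pvFix_ne _ hc, ← ih ht,
        pv_split_headI t [], pv_split_drop1 t []]
      simp

lemma pv_isdigit_dot : PySem.Chars.isdigit '.' = false := by decide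

-- B's foldl, flag already true: only digits are kept
lemma pv_fold_true (s : List Char) : ∀ (acc : List Char),
    s.foldl pvStep (acc, true) = (acc ++ s.filter PySem.Chars.isdigit, true) := by
  induction s with
  | nil => intro acc; simp
  | cons c t ih =>
    intro acc
    by_cases hd : PySem.Chars.isdigit c = true
    · rw [List.foldl_cons, pvStep_digit _ hd]
      rw [ih (acc ++ [c])]
      simp [hd]
    · have hd' : PySem.Chars.isdigit c = false := by simpa using hd
      rw [List.foldl_cons, pvStep_skip_true _ hd', ih acc]
      simp [hd']

-- B's foldl, flag still false: result is pvB1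
lemma pv_fold_false (s : List Char) : ∀ (acc : List Char),
    (s.foldl pvStep (acc, false)).1 = acc ++ pvB1 s := by
  induction s with
  | nil => intro acc; simp [pvB1]
  | cons c t ih =>
    intro acc
    by_cases hd : PySem.Chars.isdigit c = true
    · rw [List.foldl_cons, pvStep_digit _ hd, ih (acc ++ [c]), pvB1_digit _ hd]
      simp
    · have hd' : PySem.Chars.isdigit c = false := by simpa using hd
      by_cases hc : c = '.'
      · subst hc
        rw [List.foldl_cons, pvStep_dot_false _ pv_isdigit_dot, pv_fold_true t,
          pvB1_dot _ pv_isdigit_dot]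
        simp
      · rw [List.foldl_cons, pvStep_skip _ _ hd' hc, ih acc, pvB1_skip _ hd' hc]

-- digits of t = non-dots of the (digit-or-dot)-filtered t
lemma pv_filter_digit (t : List Char) :
    t.filter PySem.Chars.isdigit = (t.filter pvKeep).filter (fun d => !(d == '.')) := by
  induction t with
  | nil => rfl
  | cons c t ih =>
    by_cases hd : PySem.Chars.isdigit c = true
    · have := pv_isdigit_ne_dot c hd
      simp [hd, pvKeep, this, ih]
    · have hd' : PySem.Chars.isdigit c = false := by simpa using hd
      by_cases hc : c = '.'
      · subst hc; simp [hd', pvKeep, ih]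
      · have hcb : (c == '.') = false := by simp [hc]
        simp [hd', pvKeep, hcb, ih]

-- one-pass B equals fix of the filtered list
lemma pv_B1_eq_fix (s : List Char) : pvB1 s = pvFix (s.filter pvKeep) := by
  induction s with
  | nil => rfl
  | cons c t ih =>
    by_cases hd : PySem.Chars.isdigit c = true
    · have hne := pv_isdigit_ne_dot c hd
      have hne' : c ≠ '.' := by simpa using hne
      rw [pvB1_digit _ hd]
      have : (c :: t).filter pvKeep = c :: t.filter pvKeep := by simp [pvKeep, hd]
      rw [this, pvFix_ne _ hne', ih]
    · have hd' : PySem.Chars.isdigit c = false := by simpa using hd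
      by_cases hc : c = '.'
      · subst hc
        rw [pvB1_dot _ pv_isdigit_dot]
        have : ('.' :: t).filter pvKeep = '.' :: t.filter pvKeep := by simp [pvKeep]
        rw [this, pvFix_dot, pv_filter_digit t]
      · have hcb : (c == '.') = false := by simp [hc]
        rw [pvB1_skip _ hd' hc]
        have : (c :: t).filter pvKeep = t.filter pvKeep := by simp [pvKeep, hd', hcb]
        rw [this, ih]

-- A's core (filter then conditional repair) equals fix of the filtered list
lemma pv_Acore_eq_fix (f : List Char) :
    (if PySem.Chars.count f ['.'] > 1 then
       (PySem.Chars.splitOn f ['.']).headI ++ ['.'] ++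
         PySem.Chars.join [] (PySem.List.slice (PySem.Chars.splitOn f ['.']) (some 1))
     else f) = pvFix f := by
  rw [pv_count_eq, pv_splitOn_eq]
  by_cases h : f.count '.' > 1
  · rw [if_pos h, PySem.List.slice_from _ (by norm_num)]
    have hm : '.' ∈ f := List.count_pos_iff.mp (by omega)
    simpa using pv_repair_eq_fix f hm
  · rw [if_neg h]
    exact (pv_fix_of_count_le_one f (by omega)).symm

-- ===== VERDICT (by name: the statement is the Claim_ definition above) =====
theorem clean_numeric_string_spec : Claim_equal_clean_numeric_string := by
  intro value _
  unfold Spec_clean_numeric_string clean_numeric_string clean_numeric_string_alt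
  have hB := pv_fold_false (PySem.Chars.strip value.toList) []
  have hA := pv_Acore_eq_fix ((PySem.Chars.strip value.toList).filter
    (fun c => PySem.Chars.isdigit c || c == '.'))
  have hkeep : (fun c => PySem.Chars.isdigit c || c == '.') = pvKeep := rfl
  simp only [hkeep] at hA ⊢
  rw [hA, hB, List.nil_append, pv_B1_eq_fix]
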